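-- pv_equiv track=rewrite | github.com/ghantapavan93/Censys-Summarization-Agent | backend/services/rag.py | auto_query_from_records
-- ===== SOURCE A (Python) =====
-- from typing import List, Dict, Optional
--
-- def auto_query_from_records(records: List[Dict]) -> str:
--     seeds = []
--     for r in records[:50]:
--         t = (r.get("text") or "").lower()
--         for kw in ["ssh","brute","failed","rce","cve","outdated","vuln","port","asn","exploit","suspicious","malware"]:
--             if kw in t:
--                 seeds.append(kw)
--     if not seeds:
--         return "security incidents and anomalies in the dataset"
--     uniq = list(dict.fromkeys(seeds))[:12]
--     return " ".join(uniq)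
-- ===== SOURCE B (Python) =====
-- KEYWORDS = ["ssh", "brute", "failed", "rce", "cve", "outdated", "vuln", "port",
--             "asn", "exploit", "suspicious", "malware"]
--
-- DEFAULT_QUERY = "security incidents and anomalies in the dataset"
--
--
-- def _text(r):
--     return (r.get("text") or "").lower()
--
--
-- def auto_query_from_records(records):
--     # keyword-major scan: for each keyword find the first record (within the
--     # first 50) containing it, then order hits by (first record index, keyword rank)
--     texts = [_text(r) for r in records[:50]]
--     hits = []
--     for pos, kw in enumerate(KEYWORDS):
--         for idx, t in enumerate(texts):
--             if kw in t:
--                 hits.append((idx, pos, kw))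
--                 break
--     if not hits:
--         return DEFAULT_QUERY
--     hits.sort(key=lambda h: (h[0], h[1]))
--     return " ".join(h[2] for h in hits)
-- ===== Notes on version B (the rewrite author's own statement) =====
-- stated objective: alternative
-- what changed: Record-major append-then-dedup scan replaced by a keyword-major scan that finds each keyword's first containing record (with early break) and then sorts the hits by (first record index, keyword rank) before joining.
import Mathlib
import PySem

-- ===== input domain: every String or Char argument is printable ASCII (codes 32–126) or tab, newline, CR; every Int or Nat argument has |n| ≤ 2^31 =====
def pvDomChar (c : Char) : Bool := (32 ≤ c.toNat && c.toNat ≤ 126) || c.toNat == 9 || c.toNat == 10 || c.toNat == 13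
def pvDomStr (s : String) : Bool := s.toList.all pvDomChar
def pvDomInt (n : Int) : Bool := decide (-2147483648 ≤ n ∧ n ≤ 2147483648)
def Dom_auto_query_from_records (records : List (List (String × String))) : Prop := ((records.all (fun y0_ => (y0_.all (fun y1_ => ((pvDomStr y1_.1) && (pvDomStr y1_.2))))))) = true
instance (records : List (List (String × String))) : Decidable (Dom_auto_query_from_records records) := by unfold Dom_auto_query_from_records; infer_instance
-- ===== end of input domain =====

-- B replaces A's record-major append-then-dedup scan by a keyword-major scan (first containing
-- record per keyword with early break, then a sort by (first record index, keyword rank)); alternative decomposition, same cost.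

-- (r.get("text") or "").lower() — shared one-liner (both Pythons compute exactly this value per record)
def pvLowerText (r : List (String × String)) : String :=
  PySem.Str.lower ((List.lookup "text" r).getD "")

-- ===== PORT A =====
def auto_query_from_records (records : List (List (String × String))) : String :=
  let seeds := (PySem.List.slice records none (some 50)).foldl
    (fun seeds r =>
      let t := pvLowerText r
      (["ssh", "brute", "failed", "rce", "cve", "outdated", "vuln", "port",
        "asn", "exploit", "suspicious", "malware"] : List String).foldl
        (fun seeds kw => if PySem.Str.isIn kw t then seeds ++ [kw] else seeds) seeds)
    []
  if seeds = [] then "security incidents and anomalies in the dataset"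
  else PySem.Str.join " " (PySem.List.slice (PySem.List.dedup seeds) none (some 12))

-- ===== PORT B =====
def pvKeywords : List String :=
  ["ssh", "brute", "failed", "rce", "cve", "outdated", "vuln", "port",
   "asn", "exploit", "suspicious", "malware"]

def pvDefaultQuery : String := "security incidents and anomalies in the dataset"

def auto_query_from_records_alt (records : List (List (String × String))) : String :=
  let texts := (PySem.List.slice records none (some 50)).map pvLowerText
  let hits := (PySem.List.enumerate pvKeywords).foldl
    (fun hits pk =>
      match (PySem.List.enumerate texts).find? (fun it => PySem.Str.isIn pk.2 it.2) with
      | some it => hits ++ [(it.1, pk.1, pk.2)]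
      | none => hits)
    ([] : List (Int × Int × String))
  if hits = [] then pvDefaultQuery
  else PySem.Str.join " "
    ((PySem.List.sorted hits (fun h => toLex (h.1, h.2.1))).map (fun h => h.2.2))

-- ===== PRECONDITION & SPEC =====
def Spec_auto_query_from_records (records : List (List (String × String))) (out : String) : Prop := out = auto_query_from_records_alt records
instance (records : List (List (String × String))) (out : String) : Decidable (Spec_auto_query_from_records records out) := by unfold Spec_auto_query_from_records; infer_instance

-- ===== CLAIM (what is proved, stated in full; the proofs are below) =====
def Claim_equal_auto_query_from_records : Prop := ∀ (records : List (List (String × String))), Dom_auto_query_from_records records → Spec_auto_query_from_records records (auto_query_from_records records)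

-- ===== LEMMAS AND PROOFS =====

-- shared canonical form: process texts record-major over a shrinking candidate keyword list
def pvG : List String → List String → List String
  | _, [] => []
  | cands, t :: ts =>
      cands.filter (fun kw => PySem.Str.isIn kw t)
        ++ pvG (cands.filter (fun kw => !PySem.Str.isIn kw t)) ts

def pvGD : List (Int × String) → Int → List String → List (Int × Int × String)
  | _, _, [] => []
  | cands, i, t :: ts =>
      (cands.filter (fun pk => PySem.Str.isIn pk.2 t)).map (fun pk => (i, pk.1, pk.2))
        ++ pvGD (cands.filter (fun pk => !PySem.Str.isIn pk.2 t)) (i + 1) ts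

def pvF (cands : List (Int × String)) (i : Int) (texts : List String) : List (Int × Int × String) :=
  cands.filterMap (fun pk =>
    ((PySem.List.enumerate texts i).find? (fun it => PySem.Str.isIn pk.2 it.2)).map
      (fun it => (it.1, pk.1, pk.2)))

-- generic: a filterMap whose function splits on a test is a permutation of the two halves
theorem pv_filterMap_split {α β : Type} (p : α → Bool) (u : α → β) (v : α → Option β) :
    ∀ (l : List α),
      (l.filterMap (fun x => if p x then some (u x) else v x)).Perm
        ((l.filter p).map u ++ (l.filter (fun x => !p x)).filterMap v) := by
  intro l
  induction l with
  | nil => simp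
  | cons x xs ih =>
    by_cases hp : p x = true
    · simpa [hp] using ih.cons (u x)
    · simp only [List.filterMap_cons, List.filter_cons, hp, Bool.not_false, Bool.false_eq_true, if_false, if_true]
      cases hv : v x with
      | none => simpa using ih
      | some y => exact (ih.cons y).trans List.perm_middle.symm

theorem pvGD_perm_pvF :
    ∀ (texts : List String) (cands : List (Int × String)) (i : Int),
      (pvGD cands i texts).Perm (pvF cands i texts) := by
  intro texts
  induction texts with
  | nil => intro cands i; simp [pvGD, pvF, PySem.List.enumerate_nil]
  | cons t ts ih =>
    intro cands i
    have hF : pvF cands i (t :: ts)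
        = cands.filterMap (fun pk => if PySem.Str.isIn pk.2 t then some ((i : Int), pk.1, pk.2)
            else ((PySem.List.enumerate ts (i + 1)).find? (fun it => PySem.Str.isIn pk.2 it.2)).map
              (fun it => (it.1, pk.1, pk.2))) := by
      unfold pvF
      rw [PySem.List.enumerate_cons]
      apply List.filterMap_congr
      intro pk _
      rw [List.find?_cons]
      cases hb : PySem.Chars.isIn pk.2.toList t.toList <;> simp [hb]
    have hsplit := pv_filterMap_split (fun pk : Int × String => PySem.Str.isIn pk.2 t)
      (fun pk => ((i : Int), pk.1, pk.2))
      (fun pk => ((PySem.List.enumerate ts (i + 1)).find? (fun it => PySem.Str.isIn pk.2 it.2)).map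
        (fun it => (it.1, pk.1, pk.2))) cands
    rw [hF]
    refine List.Perm.trans ?_ hsplit.symm
    show (pvGD cands i (t :: ts)).Perm _
    unfold pvGD
    exact (List.Perm.refl _).append (ih _ (i + 1))

-- every index produced is at least the starting index
theorem pvGD_fst_ge :
    ∀ (texts : List String) (cands : List (Int × String)) (i : Int),
      ∀ h ∈ pvGD cands i texts, i ≤ h.1 := by
  intro texts
  induction texts with
  | nil => intro cands i h hh; simp [pvGD] at hh
  | cons t ts ih =>
    intro cands i h hh
    unfold pvGD at hh
    rcases List.mem_append.mp hh with hl | hr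
    · rcases List.mem_map.mp hl with ⟨pk, _, rfl⟩; exact le_refl i
    · exact le_trans (by omega) (ih _ (i + 1) h hr)

theorem pvGD_pairwise :
    ∀ (texts : List String) (cands : List (Int × String)) (i : Int),
      cands.Pairwise (fun a b => a.1 < b.1) →
      (pvGD cands i texts).Pairwise
        (fun a b => toLex (a.1, a.2.1) < toLex (b.1, b.2.1)) := by
  intro texts
  induction texts with
  | nil => intro cands i _; simp [pvGD]
  | cons t ts ih =>
    intro cands i hc
    unfold pvGD
    rw [List.pairwise_append]
    refine ⟨?_, ih _ (i + 1) (hc.filter _), ?_⟩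
    · rw [List.pairwise_map]
      refine List.Pairwise.imp ?_ (hc.filter _)
      intro a b hab
      exact Prod.Lex.toLex_lt_toLex.mpr (Or.inr ⟨rfl, hab⟩)
    · intro a ha b hb
      rcases List.mem_map.mp ha with ⟨pk, _, rfl⟩
      have := pvGD_fst_ge ts _ (i + 1) b hb
      exact Prod.Lex.toLex_lt_toLex.mpr (Or.inl (by simpa using by omega))

theorem pvGD_map_third :
    ∀ (texts : List String) (cands : List (Int × String)) (i : Int),
      (pvGD cands i texts).map (fun h => h.2.2) = pvG (cands.map (fun pk => pk.2)) texts := by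
  intro texts
  induction texts with
  | nil => intro cands i; simp [pvGD, pvG]
  | cons t ts ih =>
    intro cands i
    unfold pvGD pvG
    rw [List.map_append, ih]
    congr 1
    · rw [List.map_map, List.filter_map]; rfl
    · rw [List.filter_map]; rfl

theorem pvG_length_le :
    ∀ (texts : List String) (cands : List String),
      (pvG cands texts).length ≤ cands.length := by
  intro texts
  induction texts with
  | nil => intro cands; simp [pvG]
  | cons t ts ih =>
    intro cands
    unfold pvG
    rw [List.length_append]
    have h1 := ih (cands.filter (fun kw => !PySem.Str.isIn kw t))
    have h2 := List.length_eq_length_filter_add (l := cands) (fun kw => PySem.Str.isIn kw t)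
    omega

-- A's dedup of the record-major seed stream is the shrinking-candidate scan
theorem pv_update_flatMap (ks : List String) (hks : ks.Nodup) :
    ∀ (texts : List String) (s : List String), s.Nodup →
      PySem.Set.update s (texts.flatMap (fun t => ks.filter (fun kw => PySem.Str.isIn kw t)))
        = s ++ pvG (ks.filter (fun kw => !PySem.Set.contains s kw)) texts := by
  intro texts
  induction texts with
  | nil => intro s _; simp [pvG, PySem.Set.update_nil]
  | cons t ts ih =>
    intro s hs
    rw [List.flatMap_cons, PySem.Set.update_append]
    have hfil : PySem.Set.update s (ks.filter (fun kw => PySem.Str.isIn kw t))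
        = s ++ (ks.filter (fun kw => !PySem.Set.contains s kw)).filter
            (fun kw => PySem.Str.isIn kw t) := by
      rw [PySem.Set.update_eq_append_filter,
          PySem.Set.ofList_eq_self_of_nodup _ (hks.filter _), List.filter_comm]
    have hs' : (s ++ (ks.filter (fun kw => !PySem.Set.contains s kw)).filter
        (fun kw => PySem.Str.isIn kw t)).Nodup := by
      rw [← hfil]; exact PySem.Set.nodup_update s _ hs
    rw [hfil, ih _ hs', List.append_assoc]
    congr 2
    show pvG _ ts = pvG _ ts
    congr 1
    rw [List.filter_filter, List.filter_filter]
    apply List.filter_congr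
    intro kw hkw
    rw [Bool.eq_iff_iff]
    by_cases h1 : kw ∈ s <;> by_cases h2 : PySem.Str.isIn kw t = true <;>
      simp [List.mem_append, List.mem_filter, h1, h2, hkw]

theorem pv_foldl_inner (t : String) (s : List String) :
    pvKeywords.foldl (fun s kw => if PySem.Str.isIn kw t then s ++ [kw] else s) s
      = s ++ pvKeywords.filter (fun kw => PySem.Str.isIn kw t) := by
  simpa using PySem.List.foldl_append_if (fun kw => PySem.Str.isIn kw t) (fun kw => kw) pvKeywords s

theorem pv_seeds_eq (rs : List (List (String × String))) (acc : List String) :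
    rs.foldl (fun seeds r =>
        pvKeywords.foldl (fun s kw => if PySem.Str.isIn kw (pvLowerText r) then s ++ [kw] else s) seeds) acc
      = acc ++ (rs.map pvLowerText).flatMap (fun t => pvKeywords.filter (fun kw => PySem.Str.isIn kw t)) := by
  rw [show (fun (seeds : List String) (r : List (String × String)) =>
        pvKeywords.foldl (fun s kw => if PySem.Str.isIn kw (pvLowerText r) then s ++ [kw] else s) seeds)
      = (fun seeds r => seeds ++ pvKeywords.filter (fun kw => PySem.Str.isIn kw (pvLowerText r)))
    from funext fun seeds => funext fun r => pv_foldl_inner (pvLowerText r) seeds]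
  rw [PySem.List.foldl_append_eq_flatMap]
  rw [List.flatMap_map]

theorem pv_foldl_opt {α β : Type} (f : α → Option β) :
    ∀ (l : List α) (acc : List β),
      l.foldl (fun acc x => acc ++ (f x).toList) acc = acc ++ l.filterMap f := by
  intro l
  induction l with
  | nil => intro acc; simp
  | cons x xs ih =>
    intro acc
    cases hx : f x <;> simp [hx, ih]

theorem pv_hits_eq (texts : List String) :
    (PySem.List.enumerate pvKeywords).foldl
        (fun hits pk =>
          match (PySem.List.enumerate texts).find? (fun it => PySem.Str.isIn pk.2 it.2) with
          | some it => hits ++ [(it.1, pk.1, pk.2)]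
          | none => hits)
        ([] : List (Int × Int × String))
      = pvF (PySem.List.enumerate pvKeywords 0) 0 texts := by
  have hbody : (fun (hits : List (Int × Int × String)) (pk : Int × String) =>
      match (PySem.List.enumerate texts).find? (fun it => PySem.Str.isIn pk.2 it.2) with
      | some it => hits ++ [(it.1, pk.1, pk.2)]
      | none => hits)
      = (fun hits pk => hits ++
        (((PySem.List.enumerate texts 0).find? (fun it => PySem.Str.isIn pk.2 it.2)).map
            (fun it => (it.1, pk.1, pk.2))).toList) := by
    funext hits pk
    cases h : (PySem.List.enumerate texts 0).find? (fun it => PySem.Str.isIn pk.2 it.2) <;>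
      simp [h]
  rw [hbody, pv_foldl_opt (fun pk : Int × String =>
    ((PySem.List.enumerate texts 0).find? (fun it => PySem.Str.isIn pk.2 it.2)).map
      (fun it => (it.1, pk.1, pk.2)))]
  rfl

theorem pv_dedup_eq (texts : List String) :
    PySem.List.dedup (texts.flatMap (fun t => pvKeywords.filter (fun kw => PySem.Str.isIn kw t)))
      = pvG pvKeywords texts := by
  have hks : pvKeywords.Nodup := by decide
  rw [PySem.List.dedup_eq_ofList, ← PySem.Set.update_nil_left]
  rw [pv_update_flatMap pvKeywords hks texts [] List.nodup_nil]
  simp [PySem.Set.contains]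

theorem pv_sorted_eq (texts : List String) :
    PySem.List.sorted (pvF (PySem.List.enumerate pvKeywords 0) 0 texts)
        (fun h => toLex (h.1, h.2.1))
      = pvGD (PySem.List.enumerate pvKeywords 0) 0 texts := by
  exact PySem.List.sorted_eq_of_perm_of_pairwise_lt _ _ _
    (pvGD_perm_pvF texts _ 0)
    (pvGD_pairwise texts _ 0 (PySem.List.pairwise_lt_enumerate pvKeywords 0))

theorem pv_map_eq (texts : List String) :
    (pvGD (PySem.List.enumerate pvKeywords 0) 0 texts).map (fun h => h.2.2)
      = pvG pvKeywords texts := by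
  rw [pvGD_map_third, PySem.List.map_snd_enumerate]

theorem pv_main (records : List (List (String × String))) :
    auto_query_from_records records = auto_query_from_records_alt records := by
  simp only [auto_query_from_records, auto_query_from_records_alt, pvDefaultQuery]
  rw [show (["ssh", "brute", "failed", "rce", "cve", "outdated", "vuln", "port",
        "asn", "exploit", "suspicious", "malware"] : List String) = pvKeywords from rfl]
  rw [pv_seeds_eq, pv_hits_eq, List.nil_append]
  have hded := pv_dedup_eq ((PySem.List.slice records none (some 50)).map pvLowerText)
  have hsor := pv_sorted_eq ((PySem.List.slice records none (some 50)).map pvLowerText)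
  have hmap := pv_map_eq ((PySem.List.slice records none (some 50)).map pvLowerText)
  set texts := (PySem.List.slice records none (some 50)).map pvLowerText with htexts
  set L := pvG pvKeywords texts with hL
  set flat := texts.flatMap (fun t => pvKeywords.filter (fun kw => PySem.Str.isIn kw t)) with hflat
  have hflat_iff : flat = [] ↔ L = [] := by
    constructor
    · intro h; rw [← hded, h]; rfl
    · intro h
      have hd : PySem.List.dedup flat = [] := hded.trans h
      rw [List.eq_nil_iff_forall_not_mem]
      intro x hx
      have hxd : x ∈ PySem.List.dedup flat := by
        rw [PySem.List.dedup_eq_ofList]; exact (PySem.Set.mem_ofList flat x).mpr hx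
      rw [hd] at hxd
      exact absurd hxd (List.not_mem_nil)
  have hhits_iff : pvF (PySem.List.enumerate pvKeywords 0) 0 texts = [] ↔ L = [] := by
    constructor
    · intro h; rw [← hmap, ← hsor, h]; rfl
    · intro h
      have : (pvGD (PySem.List.enumerate pvKeywords 0) 0 texts) = [] :=
        List.map_eq_nil_iff.mp (hmap.trans h)
      exact (PySem.List.sorted_eq_nil_iff _ _ _).mp (hsor.trans this)
  by_cases hLnil : L = []
  · rw [if_pos (hflat_iff.mpr hLnil), if_pos (hhits_iff.mpr hLnil)]
  · rw [if_neg (fun h => hLnil (hflat_iff.mp h)), if_neg (fun h => hLnil (hhits_iff.mp h))]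
    congr 1
    rw [hsor, hmap, PySem.List.slice_to (PySem.List.dedup flat) (b := 12) (by norm_num), hded,
      List.take_of_length_le]
    exact le_trans (pvG_length_le texts pvKeywords) (by norm_num [pvKeywords])

-- ===== VERDICT (by name: the statement is the Claim_ definition above) =====
theorem auto_query_from_records_spec : Claim_equal_auto_query_from_records := by
  intro records _
  show auto_query_from_records records = auto_query_from_records_alt records
  exact pv_main records
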